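-- pv_equiv track=rewrite | github.com/torontoai/TorontoAITeamAgent2 | app/container_orchestration/docker_integration.py | _apply_dockerfile_optimizations
-- ===== SOURCE A (Python) =====
-- def _apply_dockerfile_optimizations(content: str) -> str:
--     """
--     Apply optimizations to Dockerfile content.
--
--     Args:
--         content: Original Dockerfile content
--
--     Returns:
--         Optimized Dockerfile content
--     """
--     lines = content.splitlines()
--     optimized_lines = []
--
--     # Combine RUN commands
--     run_commands = []
--
--     for line in lines:
--         stripped_line = line.strip()
--
--         if stripped_line.startswith("RUN "):
--             run_commands.append(stripped_line[4:])
--         else: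
--             # If we have collected RUN commands, combine them
--             if run_commands:
--                 optimized_lines.append("RUN " + " && \\\n    ".join(run_commands))
--                 run_commands = []
--
--             # Add non-RUN line
--             optimized_lines.append(line)
--
--     # Add any remaining RUN commands
--     if run_commands:
--         optimized_lines.append("RUN " + " && \\\n    ".join(run_commands))
--
--     # Add .dockerignore recommendation
--     optimized_lines.insert(0, "# Recommended: Use .dockerignore to exclude files from the build context")
--
--     # Add layer optimization recommendation
--     optimized_lines.insert(1, "# Recommended: Order instructions from least to most frequently changing")
--
--     return "\n".join(optimized_lines)
-- ===== SOURCE B (Python) =====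
-- def _apply_dockerfile_optimizations(content: str) -> str:
--     SEP = " && \\\n    "
--     lines = content.splitlines()
--     # Build tagged groups BACK-TO-FRONT: walk the lines in reverse, merging each RUN
--     # line into the RUN group that directly follows it; non-RUN lines start a fresh
--     # verbatim group.  groups is kept in reversed order and flipped once at the end.
--     groups = []  # (is_run, payload): payload = combined commands, or [the raw line]
--     for line in reversed(lines):
--         s = line.strip()
--         if s.startswith("RUN "):
--             if groups and groups[-1][0]:
--                 groups[-1] = (True, [s[4:]] + groups[-1][1])
--             else:
--                 groups.append((True, [s[4:]]))
--         else:
--             groups.append((False, [line]))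
--     groups.reverse()
--     # Render pass: each RUN group becomes one combined RUN line, others are verbatim.
--     rendered = ["RUN " + SEP.join(p) if r else p[0] for r, p in groups]
--     header = [
--         "# Recommended: Use .dockerignore to exclude files from the build context",
--         "# Recommended: Order instructions from least to most frequently changing",
--     ]
--     return "\n".join(header + rendered)
-- ===== Notes on version B (the rewrite author's own statement) =====
-- stated objective: alternative
-- what changed: Instead of A's forward pass with a pending-RUN buffer flushed on the next non-RUN line or at EOF, B walks the lines in REVERSE building an intermediate list of tagged groups (is_run, payload), merging each RUN line into the RUN group that follows it, then a separate render pass turns each group into its output line; no pending state or flush logic exists.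
import Mathlib
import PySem

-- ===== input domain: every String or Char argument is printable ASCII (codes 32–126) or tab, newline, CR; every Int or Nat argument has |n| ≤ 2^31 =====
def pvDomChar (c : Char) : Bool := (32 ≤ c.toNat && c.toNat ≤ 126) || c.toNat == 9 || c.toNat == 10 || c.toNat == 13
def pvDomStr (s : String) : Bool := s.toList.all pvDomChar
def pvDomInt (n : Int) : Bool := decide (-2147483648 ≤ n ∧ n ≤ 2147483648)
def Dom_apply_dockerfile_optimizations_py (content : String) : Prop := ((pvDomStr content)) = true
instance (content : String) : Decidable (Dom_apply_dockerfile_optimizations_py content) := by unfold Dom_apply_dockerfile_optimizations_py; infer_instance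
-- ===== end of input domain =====

-- B replaces A's forward pending-buffer flush loop by a reverse walk that merges each RUN
-- line into the tagged group following it, plus a separate render pass (alternative structure, same cost).


-- ===== PORT A =====
-- "RUN " + " && \\\n    ".join(cmds)
def pvCombine (cmds : List String) : String :=
  "RUN " ++ PySem.Str.join " && \\\n    " cmds

-- loop body: state = (optimized_lines, run_commands)
def pvStepA (st : List String × List String) (line : String) : List String × List String :=
  let stripped := PySem.Str.strip line
  if PySem.Str.startswith stripped "RUN " then
    (st.1, st.2 ++ [PySem.Str.slice stripped (some 4) none])
  else
    let acc := if st.2 ≠ [] then st.1 ++ [pvCombine st.2] else st.1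
    (acc ++ [line], [])

def apply_dockerfile_optimizations_py (content : String) : String :=
  let lines := PySem.Str.splitlines content
  let st := lines.foldl pvStepA ([], [])
  let optimized := if st.2 ≠ [] then st.1 ++ [pvCombine st.2] else st.1
  let optimized := PySem.List.insert optimized 0
    "# Recommended: Use .dockerignore to exclude files from the build context"
  let optimized := PySem.List.insert optimized 1
    "# Recommended: Order instructions from least to most frequently changing"
  PySem.Str.join "\n" optimized

-- ===== PORT B =====
-- Source B walks the lines in REVERSE, appending tagged groups (merging a RUN line into the
-- previously built group when it is a RUN group) and reverses the result at the end;
-- that reversed-append-then-reverse loop is exactly this structural recursion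
-- ('merge the head line into the front of the processed tail').
def pvMergeB : List String → List (Bool × List String)
  | [] => []
  | l :: ls =>
    let tail := pvMergeB ls
    let s := PySem.Str.strip l
    if PySem.Str.startswith s "RUN " then
      match tail with
      | (true, cmds) :: rest => (true, PySem.Str.slice s (some 4) none :: cmds) :: rest
      | _ => (true, [PySem.Str.slice s (some 4) none]) :: tail
    else (false, [l]) :: tail

-- render pass: "RUN " + SEP.join(p) if r else p[0]; a (false, p) group always has
-- payload [line] by construction, so headD "" is exact for Python's p[0]
def pvRenderB : Bool × List String → String
  | (true, p) => "RUN " ++ PySem.Str.join " && \\\n    " p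
  | (false, p) => p.headD ""

def apply_dockerfile_optimizations_py_alt (content : String) : String :=
  let lines := PySem.Str.splitlines content
  let groups := pvMergeB lines
  let rendered := groups.map pvRenderB
  PySem.Str.join "\n"
    ("# Recommended: Use .dockerignore to exclude files from the build context" ::
     "# Recommended: Order instructions from least to most frequently changing" ::
     rendered)

-- ===== PRECONDITION & SPEC =====
def Spec_apply_dockerfile_optimizations_py (content : String) (out : String) : Prop := out = apply_dockerfile_optimizations_py_alt content
instance (content : String) (out : String) : Decidable (Spec_apply_dockerfile_optimizations_py content out) := by unfold Spec_apply_dockerfile_optimizations_py; infer_instance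

-- ===== CLAIM (what is proved, stated in full; the proofs are below) =====
def Claim_equal_apply_dockerfile_optimizations_py : Prop := ∀ (content : String), Dom_apply_dockerfile_optimizations_py content → Spec_apply_dockerfile_optimizations_py content (apply_dockerfile_optimizations_py content)

-- ===== LEMMAS AND PROOFS =====

-- proof-side helper: the payloads of the leading consecutive RUN lines, and the rest
def pvTakeRuns : List String → List String × List String
  | [] => ([], [])
  | l :: ls =>
    let s := PySem.Str.strip l
    if PySem.Str.startswith s "RUN " then
      let p := pvTakeRuns ls
      (PySem.Str.slice s (some 4) none :: p.1, p.2)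
    else ([], l :: ls)

theorem pvTakeRuns_rest_le (ls : List String) : (pvTakeRuns ls).2.length ≤ ls.length := by
  induction ls with
  | nil => simp [pvTakeRuns]
  | cons l ls ih =>
    simp only [pvTakeRuns]
    split
    · simpa using Nat.le_succ_of_le ih
    · simp

-- proof-side helper: canonical recursive grouping of the lines
def pvGroupB : List String → List String
  | [] => []
  | l :: ls =>
    let s := PySem.Str.strip l
    if PySem.Str.startswith s "RUN " then
      let p := pvTakeRuns ls
      pvCombine (PySem.Str.slice s (some 4) none :: p.1) :: pvGroupB p.2
    else l :: pvGroupB ls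
  termination_by ls => ls.length
  decreasing_by
    · exact Nat.lt_succ_of_le (pvTakeRuns_rest_le ls)
    · simp

-- A's flushed or pending RUN commands, as a list segment
def pvFlush (run : List String) : List String :=
  if run = [] then [] else [pvCombine run]

theorem pvStepA_run (acc run : List String) (l : String)
    (hc : PySem.Chars.startswith (PySem.Chars.strip l.toList) ['R','U','N',' '] = true) :
    pvStepA (acc, run) l = (acc, run ++ [PySem.Str.slice (PySem.Str.strip l) (some 4) none]) := by
  simp [pvStepA, hc]

theorem pvStepA_other (acc run : List String) (l : String)
    (hc : ¬ PySem.Chars.startswith (PySem.Chars.strip l.toList) ['R','U','N',' '] = true) :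
    pvStepA (acc, run) l = (acc ++ pvFlush run ++ [l], []) := by
  cases run <;> simp [pvStepA, pvFlush, hc]

theorem pvFoldlA_shift (lines : List String) : ∀ acc run : List String,
    List.foldl pvStepA (acc, run) lines =
      (acc ++ (List.foldl pvStepA ([], run) lines).1, (List.foldl pvStepA ([], run) lines).2) := by
  induction lines with
  | nil => intro acc run; simp
  | cons l ls ih =>
    intro acc run
    simp only [List.foldl_cons]
    by_cases hc : PySem.Chars.startswith (PySem.Chars.strip l.toList) ['R','U','N',' '] = true
    · rw [pvStepA_run acc run l hc, pvStepA_run [] run l hc]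
      exact ih acc _
    · rw [pvStepA_other acc run l hc, pvStepA_other [] run l hc]
      rw [ih (acc ++ pvFlush run ++ [l]) [], ih ([] ++ pvFlush run ++ [l]) []]
      simp

-- A's final line list from a pending-run state and the remaining lines
def pvFinishA (run : List String) (lines : List String) : List String :=
  (List.foldl pvStepA ([], run) lines).1 ++ pvFlush (List.foldl pvStepA ([], run) lines).2

-- bridge 1: A's flush loop equals the canonical grouping (with pending run commands folded in)
theorem pvFinishA_eq (lines : List String) : ∀ run : List String,
    pvFinishA run lines =
      (if run = [] then pvGroupB lines
       else pvCombine (run ++ (pvTakeRuns lines).1) :: pvGroupB (pvTakeRuns lines).2) := by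
  induction hn : lines.length using Nat.strong_induction_on generalizing lines with
  | _ n ih =>
  intro run
  cases lines with
  | nil =>
    cases run with
    | nil => simp [pvFinishA, pvFlush, pvGroupB]
    | cons a as => simp [pvFinishA, pvFlush, pvTakeRuns, pvGroupB]
  | cons l ls =>
    by_cases hc : PySem.Chars.startswith (PySem.Chars.strip l.toList) ['R','U','N',' '] = true
    · have h1 : pvFinishA run (l :: ls)
          = pvFinishA (run ++ [PySem.Str.slice (PySem.Str.strip l) (some 4) none]) ls := by
        simp only [pvFinishA, List.foldl_cons, pvStepA_run [] run l hc]
      rw [h1, ih ls.length (by simp [← hn]) ls rfl _]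
      have hne : run ++ [PySem.Str.slice (PySem.Str.strip l) (some 4) none] ≠ [] := by simp
      rw [if_neg hne]
      cases run with
      | nil => simp [pvGroupB, hc]
      | cons a as => simp [pvTakeRuns, hc]
    · have h1 : pvFinishA run (l :: ls) = pvFlush run ++ [l] ++ pvFinishA [] ls := by
        simp only [pvFinishA, List.foldl_cons, pvStepA_other [] run l hc]
        rw [pvFoldlA_shift ls ([] ++ pvFlush run ++ [l]) []]
        simp
      rw [h1, ih ls.length (by simp [← hn]) ls rfl []]
      rw [if_pos rfl]
      cases run with
      | nil => simp [pvGroupB, pvFlush, hc]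
      | cons a as => simp [pvGroupB, pvTakeRuns, pvFlush, hc]

-- bridge 2a: pvMergeB on a RUN head consumes exactly the leading RUN block
theorem pvMergeB_run : ∀ (ls : List String) (l : String),
    PySem.Str.startswith (PySem.Str.strip l) "RUN " = true →
    pvMergeB (l :: ls) =
      (true, PySem.Str.slice (PySem.Str.strip l) (some 4) none :: (pvTakeRuns ls).1)
        :: pvMergeB (pvTakeRuns ls).2 := by
  intro ls
  induction ls with
  | nil => intro l hc; simp only [pvMergeB, pvTakeRuns, hc, if_true]
  | cons m ms ih =>
    intro l hc
    by_cases hm : PySem.Str.startswith (PySem.Str.strip m) "RUN " = true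
    · have htail := ih m hm
      simp only [pvMergeB, pvTakeRuns, hc, hm, if_true] at htail ⊢
      rw [htail]
    · rw [Bool.not_eq_true] at hm
      simp only [pvMergeB, pvTakeRuns, hc, hm, if_true, Bool.false_eq_true, if_false]

-- bridge 2b: rendering B's merged groups yields the canonical grouping
theorem pvMergeB_render_eq (lines : List String) :
    (pvMergeB lines).map pvRenderB = pvGroupB lines := by
  induction hn : lines.length using Nat.strong_induction_on generalizing lines with
  | _ n ih =>
  cases lines with
  | nil => simp [pvMergeB, pvGroupB]
  | cons l ls =>
    by_cases hc : PySem.Str.startswith (PySem.Str.strip l) "RUN " = true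
    · rw [pvMergeB_run ls l hc]
      have hrec := ih (pvTakeRuns ls).2.length
        (by simpa [← hn] using Nat.lt_succ_of_le (pvTakeRuns_rest_le ls)) (pvTakeRuns ls).2 rfl
      simp only [List.map_cons, hrec]
      have hc' := hc
      simp [PySem.Str.startswith, PySem.Str.strip] at hc'
      simp [pvGroupB, pvRenderB, pvCombine, hc']
    · have hrec := ih ls.length (by simp [← hn]) ls rfl
      rw [Bool.not_eq_true] at hc
      simp only [pvMergeB, hc, Bool.false_eq_true, if_false, List.map_cons, hrec]
      have hc' := hc
      simp [PySem.Str.startswith, PySem.Str.strip] at hc'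
      simp [pvGroupB, pvRenderB, hc']

theorem pvInsert0 (ys : List String) (v : String) : PySem.List.insert ys 0 v = v :: ys := by
  simp [PySem.List.insert, PySem.List.sliceIndices]

theorem pvInsert1 (y : String) (ys : List String) (v : String) :
    PySem.List.insert (y :: ys) 1 v = y :: v :: ys := by
  simp [PySem.List.insert, PySem.List.sliceIndices]

theorem pvInsert01 (xs : List String) (a b : String) :
    PySem.List.insert (PySem.List.insert xs 0 a) 1 b = a :: b :: xs := by
  rw [pvInsert0, pvInsert1]

-- ===== VERDICT (by name: the statement is the Claim_ definition above) =====
theorem apply_dockerfile_optimizations_py_spec : Claim_equal_apply_dockerfile_optimizations_py := by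
  intro content _
  unfold Spec_apply_dockerfile_optimizations_py
  unfold apply_dockerfile_optimizations_py apply_dockerfile_optimizations_py_alt
  have h : (if (List.foldl pvStepA ([], []) (PySem.Str.splitlines content)).2 ≠ [] then
      (List.foldl pvStepA ([], []) (PySem.Str.splitlines content)).1 ++ [pvCombine (List.foldl pvStepA ([], []) (PySem.Str.splitlines content)).2]
      else (List.foldl pvStepA ([], []) (PySem.Str.splitlines content)).1)
      = pvFinishA [] (PySem.Str.splitlines content) := by
    unfold pvFinishA pvFlush
    split <;> simp_all
  simp only [h, pvFinishA_eq (PySem.Str.splitlines content) [], pvInsert01,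
    pvMergeB_render_eq]
  simp
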